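-- pv_equiv track=rewrite | github.com/Bhardwaj-Saurabh/FullStack_Data_Science_BootCamp | Python_advance/assignment4.py | fact_of_fact
-- ===== SOURCE A (Python) =====
-- def fact_of_fact(num):
--     outcome = 1
--     for i in range(1, num+1):
--         fcto_2 = 1
--         for j in range(1, i+1):
--             fcto_2 *= j
--         outcome *= fcto_2
--     return outcome
-- ===== SOURCE B (Python) =====
-- def fact_of_fact(num):
--     outcome = 1
--     for k in range(1, num + 1):
--         outcome *= k ** (num + 1 - k)
--     return outcome
-- ===== Notes on version B (the rewrite author's own statement) =====
-- stated objective: alternative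
-- what changed: Replaces the nested factorial-recomputation loop by a single loop over the power identity prod_{i=1..n} i! = prod_{k=1..n} k^(n+1-k), never forming an individual factorial.
import Mathlib
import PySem

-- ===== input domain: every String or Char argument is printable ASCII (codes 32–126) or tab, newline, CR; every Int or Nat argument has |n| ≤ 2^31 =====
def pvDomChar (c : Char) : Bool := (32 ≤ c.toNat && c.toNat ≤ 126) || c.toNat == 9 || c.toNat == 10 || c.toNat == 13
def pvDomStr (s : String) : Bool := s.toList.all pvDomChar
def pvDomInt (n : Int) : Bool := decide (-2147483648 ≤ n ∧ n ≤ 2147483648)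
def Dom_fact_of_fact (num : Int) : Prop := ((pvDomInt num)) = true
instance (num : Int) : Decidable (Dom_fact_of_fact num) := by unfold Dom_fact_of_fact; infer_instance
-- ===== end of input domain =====

-- B computes the same superfactorial by the power identity ∏_{i=1..n} i! = ∏_{k=1..n} k^(n+1-k),
-- one loop instead of two nested ones (objective: alternative algorithm).

-- ===== PORT A =====
def fact_of_fact (num : Int) : Int :=
  (PySem.List.pyRange 1 (num + 1) 1).foldl
    (fun outcome i =>
      outcome * ((PySem.List.pyRange 1 (i + 1) 1).foldl (fun fcto_2 j => fcto_2 * j) 1)) 1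

-- ===== PORT B =====
def fact_of_fact_alt (num : Int) : Int :=
  (PySem.List.pyRange 1 (num + 1) 1).foldl
    (fun outcome k => outcome * k ^ (num + 1 - k).toNat) 1

-- ===== PRECONDITION & SPEC =====
def Spec_fact_of_fact (num : Int) (out : Int) : Prop := out = fact_of_fact_alt num
instance (num : Int) (out : Int) : Decidable (Spec_fact_of_fact num out) := by unfold Spec_fact_of_fact; infer_instance

-- ===== CLAIM (what is proved, stated in full; the proofs are below) =====
def Claim_equal_fact_of_fact : Prop := ∀ (num : Int), Dom_fact_of_fact num → Spec_fact_of_fact num (fact_of_fact num)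

-- ===== LEMMAS AND PROOFS =====

theorem foldl_mul_map (f : Int → Int) (xs : List Int) (init : Int) :
    xs.foldl (fun a x => a * f x) init = init * (xs.map f).prod := by
  induction xs generalizing init with
  | nil => simp
  | cons x xs ih => simp [ih, mul_assoc]

theorem foldl_mul (xs : List Int) (init : Int) :
    xs.foldl (fun a x => a * x) init = init * xs.prod := by
  induction xs generalizing init with
  | nil => simp
  | cons x xs ih => simp [ih, mul_assoc]

-- exponent shift: ∏_{k=1..n} k^(e+1-k) = ∏_{k=1..n} k^(e-k) · ∏_{k=1..n} k  (for n ≤ e)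
theorem exp_shift : ∀ (n : Nat) (e : Int), (n : Int) ≤ e →
    ((PySem.List.pyRange 1 ((n : Int) + 1) 1).map (fun k => k ^ (e + 1 - k).toNat)).prod
      = ((PySem.List.pyRange 1 ((n : Int) + 1) 1).map (fun k => k ^ (e - k).toNat)).prod
          * (PySem.List.pyRange 1 ((n : Int) + 1) 1).prod := by
  intro n
  induction n with
  | zero =>
      intro e _
      rw [show (((0:Nat):Int) + 1) = 1 by norm_num, PySem.List.pyRange_one_eq_nil le_rfl]
      simp
  | succ n ih =>
      intro e he
      have h1 : (1 : Int) ≤ (n : Int) + 1 := by omega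
      have hsplit : PySem.List.pyRange 1 ((n : Int) + 1 + 1) 1
          = PySem.List.pyRange 1 ((n : Int) + 1) 1 ++ [(n : Int) + 1] :=
        PySem.List.pyRange_one_succ_right h1
      have hne : ((n : Int) + 1 : Int) = ((n + 1 : Nat) : Int) := by push_cast; ring
      have he' : (n : Int) ≤ e := by push_cast at he ⊢; omega
      have hexp : (e + 1 - ((n : Int) + 1)).toNat = (e - ((n : Int) + 1)).toNat + 1 := by
        push_cast at he; omega
      rw [← hne] at *
      rw [hsplit]
      simp only [List.map_append, List.prod_append, List.map_cons, List.map_nil,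
        List.prod_cons, List.prod_nil]
      rw [ih e he', hexp, pow_succ]
      ring

-- main identity, over natural n
theorem main_nat : ∀ (n : Nat), fact_of_fact (n : Int) = fact_of_fact_alt (n : Int) := by
  intro n
  induction n with
  | zero =>
      norm_num [fact_of_fact, fact_of_fact_alt, PySem.List.pyRange_one_eq_nil le_rfl]
  | succ n ih =>
      have h1 : (1 : Int) ≤ (n : Int) + 1 := by omega
      have hsplit : PySem.List.pyRange 1 ((n : Int) + 1 + 1) 1
          = PySem.List.pyRange 1 ((n : Int) + 1) 1 ++ [(n : Int) + 1] :=
        PySem.List.pyRange_one_succ_right h1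
      have hne : (((n + 1 : Nat) : Int)) = (n : Int) + 1 := by push_cast; ring
      -- rewrite both sides as products
      have hA : ∀ (m : Int), fact_of_fact m
          = ((PySem.List.pyRange 1 (m + 1) 1).map
              (fun i => (PySem.List.pyRange 1 (i + 1) 1).prod)).prod := by
        intro m
        simp [fact_of_fact, foldl_mul_map, foldl_mul]
      have hB : ∀ (m : Int), fact_of_fact_alt m
          = ((PySem.List.pyRange 1 (m + 1) 1).map
              (fun k => k ^ (m + 1 - k).toNat)).prod := by
        intro m
        simp [fact_of_fact_alt, foldl_mul_map]
      rw [hA, hB] at ih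
      rw [hA, hB, hne, hsplit]
      simp only [List.map_append, List.prod_append, List.map_cons, List.map_nil,
        List.prod_cons, List.prod_nil]
      rw [hsplit, List.prod_append]
      have hshift := exp_shift n ((n : Int) + 1) (by omega)
      have hexp_top : ((n : Int) + 1 + 1 - ((n : Int) + 1)).toNat = 1 := by omega
      rw [hshift, ih, hexp_top]
      simp
      ring

-- ===== VERDICT (by name: the statement is the Claim_ definition above) =====
theorem fact_of_fact_spec : Claim_equal_fact_of_fact := by
  intro num _
  unfold Spec_fact_of_fact
  rcases le_or_gt num 0 with h | h
  · have h' : num + 1 ≤ 1 := by omega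
    simp [fact_of_fact, fact_of_fact_alt, PySem.List.pyRange_one_eq_nil h']
  · obtain ⟨n, rfl⟩ : ∃ n : Nat, num = (n : Int) :=
      ⟨num.toNat, (Int.toNat_of_nonneg (by omega)).symm⟩
    exact main_nat n
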